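-- pv_equiv track=rewrite | github.com/blaq-swan/dsa-in-python | python-primer/solutions/odd_product.py | odd_products
-- ===== SOURCE A (Python) =====
-- def odd_products(sequence):
--     """checks if two numbers have odd product
--     Args:
--         sequence: a sequence of integers
--     Returns:
--         a list of pairs of numbers whose product is odd
--     """
--
--     if not isinstance(sequence, (list, tuple, range)):
--         raise TypeError("argument must be a sequence")
--     for num in sequence:
--         if not isinstance(num, int):
--             raise TypeError("input must be a sequence of integers")
--
--     output = []
--     for x in range(len(sequence)):
--         for y in range(x + 1, len(sequence)):
--             if (sequence[x] * sequence[y]) & 1 == 1: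
--                 output += [(sequence[x], sequence[y])]
--
--     return output
-- ===== SOURCE B (Python) =====
-- def odd_products(sequence):
--     """checks if two numbers have odd product
--     Args:
--         sequence: a sequence of integers
--     Returns:
--         a list of pairs of numbers whose product is odd
--     """
--     if not isinstance(sequence, (list, tuple, range)):
--         raise TypeError("argument must be a sequence")
--     for num in sequence:
--         if not isinstance(num, int):
--             raise TypeError("input must be a sequence of integers")
--     # a product is odd exactly when both factors are odd, so pair up the odds:
--     # repeatedly split off the first remaining odd and pair it with the rest
--     rest = [n for n in sequence if n & 1 == 1]
--     out = []
--     while rest: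
--         head, *rest = rest
--         out += [(head, b) for b in rest]
--     return out
-- ===== Notes on version B (the rewrite author's own statement) =====
-- stated objective: simpler
-- what changed: B replaces A's scan over all index pairs with a per-pair multiplication-and-parity test by one filter keeping the odd elements followed by a head/tail-splitting loop that pairs each odd element with the odd elements after it; the quadratic pair scan then runs over the k odd elements only.
import Mathlib
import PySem

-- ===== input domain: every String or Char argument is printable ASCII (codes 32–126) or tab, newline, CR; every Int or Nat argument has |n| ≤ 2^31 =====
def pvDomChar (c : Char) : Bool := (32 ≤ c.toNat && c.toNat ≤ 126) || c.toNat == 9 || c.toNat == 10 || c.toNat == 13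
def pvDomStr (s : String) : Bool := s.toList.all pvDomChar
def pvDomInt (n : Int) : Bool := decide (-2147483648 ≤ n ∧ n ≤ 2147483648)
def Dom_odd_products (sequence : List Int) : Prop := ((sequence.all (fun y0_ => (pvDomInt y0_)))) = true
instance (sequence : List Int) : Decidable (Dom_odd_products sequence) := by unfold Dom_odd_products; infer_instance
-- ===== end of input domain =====

-- B replaces A's index-pair scan with a parity test (a product is odd iff both
-- factors are odd) by one filter of the odd elements followed by a structural
-- recursion pairing each odd element with the odd elements after it (objective:
-- simpler — the per-pair multiplication and parity test disappear).

-- ===== PORT A =====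
def odd_products (sequence : List Int) : List (Int × Int) :=
  (PySem.List.pyRange 0 (sequence.length : Int) 1).foldl (fun output x =>
    (PySem.List.pyRange (x + 1) (sequence.length : Int) 1).foldl (fun output y =>
      if PySem.Int.band (PySem.List.pyGetD sequence x 0 * PySem.List.pyGetD sequence y 0) 1 == 1 then
        output ++ [(PySem.List.pyGetD sequence x 0, PySem.List.pyGetD sequence y 0)]
      else output) output) []

-- ===== PORT B =====
-- the while loop: split off the first remaining odd, pair it with the rest, repeat
def pvPairsLoop : List Int → List (Int × Int) → List (Int × Int)
  | [], out => out
  | head :: rest, out => pvPairsLoop rest (out ++ rest.map (fun b => (head, b)))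

def odd_products_alt (sequence : List Int) : List (Int × Int) :=
  pvPairsLoop (sequence.filter (fun n => PySem.Int.band n 1 == 1)) []

-- ===== PRECONDITION & SPEC =====
def Spec_odd_products (sequence : List Int) (out : List (Int × Int)) : Prop := out = odd_products_alt sequence
instance (sequence : List Int) (out : List (Int × Int)) : Decidable (Spec_odd_products sequence out) := by unfold Spec_odd_products; infer_instance

-- ===== CLAIM (what is proved, stated in full; the proofs are below) =====
def Claim_equal_odd_products : Prop := ∀ (sequence : List Int), Dom_odd_products sequence → Spec_odd_products sequence (odd_products sequence)

-- ===== LEMMAS AND PROOFS =====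

-- non-accumulator form of B's while loop, for the proofs
def pvPairsB : List Int → List (Int × Int)
  | [] => []
  | head :: rest => rest.map (fun b => (head, b)) ++ pvPairsB rest

lemma pvPairsLoop_eq (l : List Int) : ∀ out, pvPairsLoop l out = out ++ pvPairsB l := by
  induction l with
  | nil => intro out; simp [pvPairsLoop, pvPairsB]
  | cons h t ih => intro out; rw [pvPairsLoop, ih, pvPairsB, List.append_assoc]

-- A's per-x inner loop result, with the Nat index x already resolved
def pvInner (s : List Int) (x : Nat) : List (Int × Int) :=
  ((s.drop (x + 1)).filter (fun v => PySem.Int.band (s.getD x 0 * v) 1 == 1)).map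
    (fun v => (s.getD x 0, v))

-- parity of a product: odd iff both factors odd
lemma pv_band_mul (a b : Int) :
    (PySem.Int.band (a * b) 1 == 1) = ((PySem.Int.band a 1 == 1) && (PySem.Int.band b 1 == 1)) := by
  have h2 : (0 : Int) < 2 := by norm_num
  simp only [PySem.Int.band_one, PySem.Int.mod_eq_emod_of_pos h2]
  rcases Int.emod_two_eq a with ha | ha <;> rcases Int.emod_two_eq b with hb | hb <;>
    rw [Int.mul_emod, ha, hb] <;> simp

lemma pv_foldl_flat {α β : Type} (l : List α) (F : List β → α → List β) (G : α → List β)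
    (h : ∀ (acc : List β) (x : α), x ∈ l → F acc x = acc ++ G x) :
    ∀ acc, l.foldl F acc = acc ++ l.flatMap G := by
  induction l with
  | nil => intro acc; simp
  | cons x xs ih =>
    intro acc
    rw [List.foldl_cons, h acc x (by simp), ih (fun a y hy => h a y (by simp [hy])),
      List.flatMap_cons, List.append_assoc]

lemma pv_A_flat (s : List Int) :
    odd_products s = (List.range s.length).flatMap (pvInner s) := by
  unfold odd_products
  rw [PySem.List.pyRange_zero_nat]
  rw [List.foldl_map]
  have hbody : ∀ (acc : List (Int × Int)) (k : Nat), k ∈ List.range s.length →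
      (PySem.List.pyRange ((k : Int) + 1) (s.length : Int) 1).foldl (fun output y =>
        if PySem.Int.band (PySem.List.pyGetD s (k : Int) 0 * PySem.List.pyGetD s y 0) 1 == 1 then
          output ++ [(PySem.List.pyGetD s (k : Int) 0, PySem.List.pyGetD s y 0)]
        else output) acc = acc ++ pvInner s k := by
    intro acc k _
    have hnn : (0 : Int) ≤ (k : Int) + 1 := by positivity
    have h1 := PySem.List.foldl_pyRange_pyGetD (xs := s) (a := (k : Int) + 1) (d := 0)
      (f := fun output v =>
        if PySem.Int.band (PySem.List.pyGetD s (k : Int) 0 * v) 1 == 1 then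
          output ++ [(PySem.List.pyGetD s (k : Int) 0, v)]
        else output) (init := acc) hnn
    simp only [PySem.List.len_eq] at h1
    rw [h1]
    have htn : ((k : Int) + 1).toNat = k + 1 := by omega
    rw [htn, PySem.List.foldl_append_if, pvInner]
    simp [PySem.List.pyGetD_natCast]
  exact pv_foldl_flat _ _ _ (fun acc x hx => hbody acc x hx) []

lemma pv_inner_cons (h : Int) (t : List Int) (x : Nat) :
    pvInner (h :: t) (x + 1) = pvInner t x := rfl

lemma pv_flat_go (s : List Int) :
    (List.range s.length).flatMap (pvInner s) = pvPairsB (s.filter (fun n => PySem.Int.band n 1 == 1)) := by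
  induction s with
  | nil => simp [pvPairsB]
  | cons h t ih =>
    rw [List.length_cons, List.range_succ_eq_map, List.flatMap_cons, List.flatMap_map]
    have htail : (List.range t.length).flatMap (fun k => pvInner (h :: t) (k + 1)) =
        (List.range t.length).flatMap (pvInner t) := by
      simp only [pv_inner_cons]
    rw [htail, ih]
    by_cases hodd : PySem.Int.band h 1 == 1
    · have hfil : (h :: t).filter (fun n => PySem.Int.band n 1 == 1) =
        h :: t.filter (fun n => PySem.Int.band n 1 == 1) := by simp [hodd]
      rw [hfil, pvPairsB]
      congr 1
      unfold pvInner
      simp only [List.getD, List.drop_succ_cons, List.drop_zero, List.getElem?_cons_zero,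
        Option.getD_some]
      rw [List.filter_congr (fun v _ => by rw [pv_band_mul, hodd, Bool.true_and])]
    · have hf : (PySem.Int.band h 1 == 1) = false := by simpa using hodd
      have hfil : (h :: t).filter (fun n => PySem.Int.band n 1 == 1) =
        t.filter (fun n => PySem.Int.band n 1 == 1) := by
        simp only [List.filter_cons, hf]; rfl
      rw [hfil]
      have hzero : pvInner (h :: t) 0 = [] := by
        unfold pvInner
        simp only [List.getD, List.drop_succ_cons, List.drop_zero, List.getElem?_cons_zero,
          Option.getD_some]
        rw [List.filter_congr (fun v _ => by rw [pv_band_mul, hf, Bool.false_and])]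
        simp
      rw [hzero, List.nil_append]

-- ===== VERDICT (by name: the statement is the Claim_ definition above) =====
theorem odd_products_spec : Claim_equal_odd_products := by
  intro s _
  unfold Spec_odd_products odd_products_alt
  rw [pv_A_flat, pv_flat_go, pvPairsLoop_eq, List.nil_append]
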